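-- pv_equiv track=rewrite | github.com/thanakritju/advent-of-code | aoc2020/day17/game_of_life.py | create_big_space
-- ===== SOURCE A (Python) =====
-- def create_big_space(space, cycles):
--     max_n = len(space) + cycles * 2
--     big_space = [
--         [
--             ['.' for x in range(max_n)]
--             for y in range(max_n)
--         ]
--         for z in range(1 + cycles * 2)
--     ]
--     for j, y in enumerate(space):
--         for i, x in enumerate(y):
--             big_space[cycles][j + cycles][i + cycles] = x
--
--     return big_space
-- ===== SOURCE B (Python) =====
-- def create_big_space(space, cycles):
--     # Build the result plane-by-plane: one directly-constructed center plane
--     # at z == cycles, a fresh all-'.' plane everywhere else.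
--     max_n = len(space) + 2 * cycles
--     center = (
--         [['.'] * max_n for _ in range(cycles)]
--         + [['.'] * cycles + list(row) + ['.'] * (max_n - cycles - len(row))
--            for row in space]
--         + [['.'] * max_n for _ in range(cycles)]
--     )
--     return [center if z == cycles else [['.'] * max_n for _ in range(max_n)]
--             for z in range(1 + 2 * cycles)]
-- ===== Notes on version B (the rewrite author's own statement) =====
-- stated objective: simpler
-- what changed: B builds the result plane-by-plane (directly constructing the one center plane from cycles leading '.', the row contents and trailing padding, and fresh all-'.' planes elsewhere) instead of allocating a full all-'.' 3D grid and then overwriting cells one by one.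
import Mathlib
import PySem

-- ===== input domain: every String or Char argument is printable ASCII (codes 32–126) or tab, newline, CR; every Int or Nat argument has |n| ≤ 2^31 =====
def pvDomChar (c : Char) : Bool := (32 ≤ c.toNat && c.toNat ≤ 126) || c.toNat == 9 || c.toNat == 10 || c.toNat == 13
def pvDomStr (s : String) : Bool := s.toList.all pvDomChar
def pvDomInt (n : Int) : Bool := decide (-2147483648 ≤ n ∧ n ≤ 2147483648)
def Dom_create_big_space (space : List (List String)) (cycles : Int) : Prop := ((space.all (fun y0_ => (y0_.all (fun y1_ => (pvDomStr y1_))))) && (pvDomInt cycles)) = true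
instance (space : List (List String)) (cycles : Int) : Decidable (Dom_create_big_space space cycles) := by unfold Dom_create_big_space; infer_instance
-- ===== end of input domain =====

-- B builds the padded 3D grid plane-by-plane (one directly constructed center
-- plane, blank planes elsewhere) instead of allocating an all-'.' grid and
-- overwriting cells; objective: simpler decomposition (return value only; A
-- mutates its freshly built grid internally, neither mutates the arguments).

-- ===== PORT A =====
def create_big_space (space : List (List String)) (cycles : Int) : List (List (List String)) :=
  let max_n : Int := (space.length : Int) + cycles * 2
  let big_space : List (List (List String)) :=
    (PySem.List.pyRange 0 (1 + cycles * 2) 1).map (fun _z =>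
      (PySem.List.pyRange 0 max_n 1).map (fun _y =>
        (PySem.List.pyRange 0 max_n 1).map (fun _x => ".")))
  (PySem.List.enumerate space 0).foldl (fun bs jy =>
    (PySem.List.enumerate jy.2 0).foldl (fun bs ix =>
      -- big_space[cycles][j + cycles][i + cycles] = x : in-place nested
      -- assignment, rendered functionally; exact under Pre_ (indices in range)
      let plane := PySem.List.pyGetD bs cycles []
      let row := PySem.List.pyGetD plane (jy.1 + cycles) []
      PySem.List.pySetD bs cycles
        (PySem.List.pySetD plane (jy.1 + cycles)
          (PySem.List.pySetD row (ix.1 + cycles) ix.2))) bs) big_space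

-- ===== PORT B =====
-- ['.'] * k is List.replicate k.toNat "." (empty for k ≤ 0, as in Python)
def create_big_space_alt (space : List (List String)) (cycles : Int) : List (List (List String)) :=
  let max_n : Int := (space.length : Int) + 2 * cycles
  let center : List (List String) :=
    List.replicate cycles.toNat (List.replicate max_n.toNat ".")
    ++ space.map (fun row =>
         List.replicate cycles.toNat "." ++ row
           ++ List.replicate (max_n - cycles - (row.length : Int)).toNat ".")
    ++ List.replicate cycles.toNat (List.replicate max_n.toNat ".")
  (PySem.List.pyRange 0 (1 + 2 * cycles) 1).map (fun z =>
    if z = cycles then center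
    else List.replicate max_n.toNat (List.replicate max_n.toNat "."))

-- ===== PRECONDITION & SPEC =====
-- Pre_ excludes exactly the inputs on which A raises IndexError: a row longer
-- than len(space) + cycles (assignment column out of range), or a negative
-- cycles together with a nonempty row (empty plane list indexed).
def Pre_create_big_space (space : List (List String)) (cycles : Int) : Prop :=
  if 0 ≤ cycles then ∀ y ∈ space, (y.length : Int) ≤ (space.length : Int) + cycles
  else ∀ y ∈ space, y = []
instance (space : List (List String)) (cycles : Int) : Decidable (Pre_create_big_space space cycles) := by unfold Pre_create_big_space; infer_instance

def pvWitness_create_big_space : List (List String) × Int := ([["#", "."], [".", "#"]], 1)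

def Spec_create_big_space (space : List (List String)) (cycles : Int) (out : List (List (List String))) : Prop := out = create_big_space_alt space cycles
instance (space : List (List String)) (cycles : Int) (out : List (List (List String))) : Decidable (Spec_create_big_space space cycles out) := by unfold Spec_create_big_space; infer_instance

-- ===== CLAIM (what is proved, stated in full; the proofs are below) =====
def Claim_equal_create_big_space : Prop := ∀ (space : List (List String)) (cycles : Int), Dom_create_big_space space cycles → Pre_create_big_space space cycles → Spec_create_big_space space cycles (create_big_space space cycles)

-- ===== LEMMAS AND PROOFS =====

-- l.set n (l.getD n d) = l, with List.set's out-of-range no-op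
theorem pv_set_getD_self {α : Type} (l : List α) (n : Nat) (d : α) :
    l.set n (l.getD n d) = l := by
  by_cases h : n < l.length
  · rw [List.getD_eq_getElem l d h, List.set_getElem_self]
  · exact List.set_eq_of_length_le (by omega)

-- hoisting a fold of updates at one fixed index out of the list
theorem pv_hoist {α β : Type} (n : Nat) (d : α) (g : β → α → α) :
    ∀ (ps : List β) (l : List α),
      ps.foldl (fun l p => l.set n (g p (l.getD n d))) l
        = l.set n (ps.foldl (fun a p => g p a) (l.getD n d)) := by
  intro ps
  induction ps with
  | nil => intro l; exact (pv_set_getD_self l n d).symm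
  | cons p ps ih =>
    intro l
    simp only [List.foldl_cons]
    rw [ih, List.set_set]
    by_cases h : n < l.length
    · rw [List.getD_eq_getElem _ d (by simpa using h), List.getElem_set_self,
        List.getD_eq_getElem l d h]
    · rw [List.set_eq_of_length_le (l := l) (by omega),
        List.set_eq_of_length_le (l := l) (by omega)]

-- scatter: successive updates at indices pre.length, pre.length+1, …
theorem pv_scatter {α ρ : Type} (u : α → ρ → ρ) (d : ρ) :
    ∀ (xs : List α) (pre mid post : List ρ), mid.length = xs.length →
      (PySem.List.enumerate xs (pre.length : Int)).foldl
          (fun pl jy => pl.set jy.1.toNat (u jy.2 (pl.getD jy.1.toNat d)))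
          (pre ++ (mid ++ post))
        = pre ++ ((xs.zip mid).map (fun p => u p.1 p.2) ++ post) := by
  intro xs
  induction xs with
  | nil =>
    intro pre mid post hlen
    rw [List.length_eq_zero_iff.mp hlen]
    simp [PySem.List.enumerate]
  | cons x xs ih =>
    intro pre mid post hlen
    cases mid with
    | nil => simp at hlen
    | cons r mid =>
      rw [PySem.List.enumerate_cons, List.foldl_cons]
      have hset : (pre ++ (r :: mid ++ post)).set ((pre.length : Int)).toNat
          (u x ((pre ++ (r :: mid ++ post)).getD ((pre.length : Int)).toNat d))
          = (pre ++ [u x r]) ++ (mid ++ post) := by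
        have h1 : ((pre.length : Int)).toNat = pre.length := by omega
        rw [h1, List.getD_eq_getElem _ d (by simp), List.getElem_append_right (by omega)]
        simp
      rw [hset]
      have h2 : (pre.length : Int) + 1 = ((pre ++ [u x r]).length : Int) := by
        simp
      rw [h2, ih (pre ++ [u x r]) mid post (by simpa using hlen)]
      simp

-- enumerate with a shifted start
theorem pv_enumerate_shift {α : Type} (t : Int) :
    ∀ (xs : List α) (s : Int),
      PySem.List.enumerate xs (s + t) = (PySem.List.enumerate xs s).map (fun p => (p.1 + t, p.2)) := by
  intro xs
  induction xs with
  | nil => intro s; simp [PySem.List.enumerate]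
  | cons x xs ih =>
    intro s
    rw [PySem.List.enumerate_cons, PySem.List.enumerate_cons, List.map_cons]
    have : s + 1 + t = s + t + 1 := by ring
    rw [← this, ih (s + 1)]

theorem pv_zip_replicate_map {α ρ σ : Type} (b : ρ) (f : α → ρ → σ) :
    ∀ (xs : List α), (xs.zip (List.replicate xs.length b)).map (fun p => f p.1 p.2)
      = xs.map (fun x => f x b) := by
  intro xs
  induction xs with
  | nil => simp
  | cons x xs ih => simpa [List.replicate_succ] using ih

theorem pv_map_const_replicate {α ρ : Type} (c : ρ) :
    ∀ (xs : List α), xs.map (fun _ => c) = List.replicate xs.length c := by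
  intro xs; induction xs with
  | nil => simp
  | cons x xs ih => simp [List.replicate_succ, ih]

-- shifted form of pv_scatter, matching the (j + cycles) indices of port A
theorem pv_scatter' {α ρ : Type} (u : α → ρ → ρ) (d : ρ) (xs : List α)
    (pre mid post : List ρ) (h : mid.length = xs.length) :
    (PySem.List.enumerate xs 0).foldl
        (fun pl jy => pl.set (jy.1 + (pre.length : Int)).toNat
          (u jy.2 (pl.getD (jy.1 + (pre.length : Int)).toNat d)))
        (pre ++ (mid ++ post))
      = pre ++ ((xs.zip mid).map (fun p => u p.1 p.2) ++ post) := by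
  rw [← pv_scatter u d xs pre mid post h]
  have e := pv_enumerate_shift (t := (pre.length : Int)) xs 0
  rw [zero_add] at e
  rw [e, List.foldl_map]


theorem pv_map_pyRange_const {ρ : Type} (a : Int) (x : ρ) :
    (PySem.List.pyRange 0 a).map (fun _ => x) = List.replicate a.toNat x := by
  rw [pv_map_const_replicate, PySem.List.length_pyRange_one]
  congr 1
  omega

-- the per-row update function that port A's nested fold performs at plane index cn
def pvG (cn : Nat) (jy : Int × List String) (pl : List (List String)) : List (List String) :=
  pl.set (jy.1 + (cn : Int)).toNat
    ((PySem.List.enumerate jy.2 0).foldl (fun r ix => r.set (ix.1 + (cn : Int)).toNat ix.2)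
      (pl.getD (jy.1 + (cn : Int)).toNat []))

def pvG2 (cn : Nat) (jy : Int × List String) (ix : Int × String) (pl : List (List String)) : List (List String) :=
  pl.set (jy.1 + (cn : Int)).toNat
    ((pl.getD (jy.1 + (cn : Int)).toNat []).set (ix.1 + (cn : Int)).toNat ix.2)

theorem pv_fst_nonneg {α : Type} (xs : List α) (jy : Int × α)
    (h : jy ∈ PySem.List.enumerate xs 0) : 0 ≤ jy.1 := by
  rcases (PySem.List.mem_enumerate_iff _ _ _).mp h with ⟨k, hk, hrw⟩
  rw [hrw]
  simp

-- port A's double mutation loop, hoisted: a single update of plane cn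
theorem pv_A_fold (cn : Nat) (space : List (List String)) (big : List (List (List String))) :
    (PySem.List.enumerate space 0).foldl (fun bs jy =>
      (PySem.List.enumerate jy.2 0).foldl (fun bs ix =>
        PySem.List.pySetD bs ((cn : Int))
          (PySem.List.pySetD (PySem.List.pyGetD bs ((cn : Int)) []) (jy.1 + (cn : Int))
            (PySem.List.pySetD
              (PySem.List.pyGetD (PySem.List.pyGetD bs ((cn : Int)) []) (jy.1 + (cn : Int)) [])
              (ix.1 + (cn : Int)) ix.2))) bs) big
    = big.set cn ((PySem.List.enumerate space 0).foldl (fun pl jy => pvG cn jy pl)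
        (big.getD cn [])) := by
  have key : ∀ (acc : List (List (List String))), ∀ jy ∈ PySem.List.enumerate space 0,
      (PySem.List.enumerate jy.2 0).foldl (fun bs ix =>
        PySem.List.pySetD bs ((cn : Int))
          (PySem.List.pySetD (PySem.List.pyGetD bs ((cn : Int)) []) (jy.1 + (cn : Int))
            (PySem.List.pySetD
              (PySem.List.pyGetD (PySem.List.pyGetD bs ((cn : Int)) []) (jy.1 + (cn : Int)) [])
              (ix.1 + (cn : Int)) ix.2))) acc
      = acc.set cn (pvG cn jy (acc.getD cn [])) := by
    intro acc jy hjy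
    have hj : 0 ≤ jy.1 := pv_fst_nonneg _ _ hjy
    have hji : 0 ≤ jy.1 + (cn : Int) := by omega
    calc (PySem.List.enumerate jy.2 0).foldl (fun bs ix =>
        PySem.List.pySetD bs ((cn : Int))
          (PySem.List.pySetD (PySem.List.pyGetD bs ((cn : Int)) []) (jy.1 + (cn : Int))
            (PySem.List.pySetD
              (PySem.List.pyGetD (PySem.List.pyGetD bs ((cn : Int)) []) (jy.1 + (cn : Int)) [])
              (ix.1 + (cn : Int)) ix.2))) acc
        = (PySem.List.enumerate jy.2 0).foldl
            (fun bs ix => bs.set cn (pvG2 cn jy ix (bs.getD cn []))) acc := by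
          apply PySem.List.foldl_congr_mem
          intro acc2 ix hix
          have hi : 0 ≤ ix.1 := pv_fst_nonneg _ _ hix
          have hii : 0 ≤ ix.1 + (cn : Int) := by omega
          simp only [pvG2, PySem.List.pySetD_of_nonneg _ _ hii,
            PySem.List.pyGetD_of_nonneg _ _ hji, PySem.List.pySetD_of_nonneg _ _ hji,
            PySem.List.pyGetD_natCast, PySem.List.pySetD_natCast]
      _ = acc.set cn ((PySem.List.enumerate jy.2 0).foldl
            (fun a ix => pvG2 cn jy ix a) (acc.getD cn [])) :=
          pv_hoist cn [] (fun ix pl => pvG2 cn jy ix pl) _ acc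
      _ = acc.set cn (pvG cn jy (acc.getD cn [])) := by
          have h := pv_hoist ((jy.1 + (cn : Int)).toNat) ([] : List String)
            (fun (ix : Int × String) (r : List String) => r.set (ix.1 + (cn : Int)).toNat ix.2)
            (PySem.List.enumerate jy.2 0) (acc.getD cn [])
          exact congrArg (acc.set cn) h
  calc (PySem.List.enumerate space 0).foldl _ big
      = (PySem.List.enumerate space 0).foldl
          (fun bs jy => bs.set cn (pvG cn jy (bs.getD cn []))) big :=
        PySem.List.foldl_congr_mem _ _ _ _ key
    _ = big.set cn ((PySem.List.enumerate space 0).foldl (fun pl jy => pvG cn jy pl)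
          (big.getD cn [])) := pv_hoist cn [] (fun jy pl => pvG cn jy pl) _ big

theorem pv_set_middle {ρ : Type} (pre : List ρ) (x v : ρ) (post : List ρ) (n : Nat)
    (h : n = pre.length) : (pre ++ x :: post).set n v = pre ++ v :: post := by
  subst h
  rw [List.set_append]
  simp

theorem pv_map_range_ite {ρ : Type} (cn : Nat) (C blank : ρ) :
    (PySem.List.pyRange 0 (1 + 2 * (cn : Int))).map (fun z => if z = (cn : Int) then C else blank)
      = List.replicate cn blank ++ C :: List.replicate cn blank := by
  rw [PySem.List.pyRange_one_append 0 (cn : Int) (1 + 2 * (cn : Int)) (by omega) (by omega),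
    show PySem.List.pyRange ((cn : Int)) (1 + 2 * (cn : Int))
        = ((cn : Int)) :: PySem.List.pyRange ((cn : Int) + 1) (1 + 2 * (cn : Int)) from
      PySem.List.pyRange_one_cons (by omega),
    List.map_append, List.map_cons, if_pos rfl]
  congr 1
  · rw [List.map_congr_left (g := fun _ => blank) (fun z hz =>
      if_neg (by have := PySem.List.mem_pyRange_one.mp hz; omega)),
      pv_map_const_replicate, PySem.List.length_pyRange_one]
    congr 1
  · congr 1
    rw [List.map_congr_left (g := fun _ => blank) (fun z hz =>
      if_neg (by have := PySem.List.mem_pyRange_one.mp hz; omega)),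
      pv_map_const_replicate, PySem.List.length_pyRange_one]
    congr 1
    all_goals omega

theorem pv_rep_split {ρ : Type} (a b c d : Nat) (x : ρ) (h : a = b + (c + d)) :
    List.replicate a x = List.replicate b x ++ (List.replicate c x ++ List.replicate d x) := by
  subst h
  rw [List.replicate_add, List.replicate_add]

theorem pv_scatter2 {α ρ : Type} (u : α → ρ → ρ) (d : ρ) (xs : List α)
    (pre mid post : List ρ) (h : mid.length = xs.length) (c : Nat) (hc : pre.length = c) :
    (PySem.List.enumerate xs 0).foldl
        (fun pl jy => pl.set (jy.1 + (c : Int)).toNat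
          (u jy.2 (pl.getD (jy.1 + (c : Int)).toNat d)))
        (pre ++ (mid ++ post))
      = pre ++ ((xs.zip mid).map (fun p => u p.1 p.2) ++ post) := by
  subst hc
  exact pv_scatter' u d xs pre mid post h

-- the hoisted loop turns the blank center plane into the directly built one
theorem pv_center (space : List (List String)) (cn : Nat)
    (hlen : ∀ y ∈ space, y.length ≤ space.length + cn) :
    (PySem.List.enumerate space 0).foldl (fun pl jy => pvG cn jy pl)
        (List.replicate (space.length + 2 * cn) (List.replicate (space.length + 2 * cn) "."))
      = List.replicate cn (List.replicate (space.length + 2 * cn) ".")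
        ++ space.map (fun y => List.replicate cn "." ++ y
            ++ List.replicate (space.length + 2 * cn - cn - y.length) ".")
        ++ List.replicate cn (List.replicate (space.length + 2 * cn) ".") := by
  have hdec : List.replicate (space.length + 2 * cn) (List.replicate (space.length + 2 * cn) ".")
      = List.replicate cn (List.replicate (space.length + 2 * cn) ".")
        ++ (List.replicate space.length (List.replicate (space.length + 2 * cn) ".")
            ++ List.replicate cn (List.replicate (space.length + 2 * cn) ".")) :=
    pv_rep_split _ cn space.length cn _ (by omega)
  rw [hdec]
  have hs : (PySem.List.enumerate space 0).foldl (fun pl jy => pvG cn jy pl)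
      (List.replicate cn (List.replicate (space.length + 2 * cn) ".")
        ++ (List.replicate space.length (List.replicate (space.length + 2 * cn) ".")
            ++ List.replicate cn (List.replicate (space.length + 2 * cn) ".")))
      = List.replicate cn (List.replicate (space.length + 2 * cn) ".")
        ++ ((space.zip (List.replicate space.length (List.replicate (space.length + 2 * cn) "."))).map
              (fun p => (PySem.List.enumerate p.1 0).foldl
                (fun r ix => r.set (ix.1 + (cn : Int)).toNat ix.2) p.2)
            ++ List.replicate cn (List.replicate (space.length + 2 * cn) ".")) :=
    pv_scatter2
      (fun (y : List String) (r : List String) => (PySem.List.enumerate y 0).foldl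
        (fun (r : List String) (ix : Int × String) => r.set (ix.1 + (cn : Int)).toNat ix.2) r)
      [] space _ _ _ (by simp) cn (by simp)
  rw [hs]
  have hz : (space.zip (List.replicate space.length (List.replicate (space.length + 2 * cn) "."))).map
        (fun p => (PySem.List.enumerate p.1 0).foldl
          (fun r ix => r.set (ix.1 + (cn : Int)).toNat ix.2) p.2)
      = space.map (fun y => (PySem.List.enumerate y 0).foldl
          (fun r ix => r.set (ix.1 + (cn : Int)).toNat ix.2)
          (List.replicate (space.length + 2 * cn) ".")) :=
    pv_zip_replicate_map _
      (fun (y : List String) (r : List String) => (PySem.List.enumerate y 0).foldl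
        (fun (r : List String) (ix : Int × String) => r.set (ix.1 + (cn : Int)).toNat ix.2) r) space
  rw [hz]
  rw [List.append_assoc]
  congr 1
  congr 1
  apply List.map_congr_left
  intro y hy
  have hl := hlen y hy
  have hdec2 : List.replicate (space.length + 2 * cn) ("." : String)
      = List.replicate cn "." ++ (List.replicate y.length "."
          ++ List.replicate (space.length + 2 * cn - cn - y.length) ".") :=
    pv_rep_split _ cn y.length _ _ (by omega)
  rw [hdec2]
  have hs2 : (PySem.List.enumerate y 0).foldl
        (fun r ix => r.set (ix.1 + (cn : Int)).toNat ix.2)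
        (List.replicate cn "." ++ (List.replicate y.length "."
          ++ List.replicate (space.length + 2 * cn - cn - y.length) "."))
      = List.replicate cn "."
        ++ ((y.zip (List.replicate y.length ("." : String))).map (fun p => p.1)
            ++ List.replicate (space.length + 2 * cn - cn - y.length) ".") :=
    pv_scatter2 (fun (x : String) (_ : String) => x) "" y _ _ _ (by simp) cn (by simp)
  rw [hs2]
  have hz2 : (y.zip (List.replicate y.length ("." : String))).map (fun p => p.1)
      = y.map (fun x => x) :=
    pv_zip_replicate_map "." (fun x (_ : String) => x) y
  rw [hz2]
  simp

-- A on nonnegative cycles = (cn : Nat): the closed plane-by-plane form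
theorem pv_A_char (space : List (List String)) (cn : Nat)
    (hlen : ∀ y ∈ space, y.length ≤ space.length + cn) :
    create_big_space space (cn : Int)
      = List.replicate cn (List.replicate (space.length + 2 * cn) (List.replicate (space.length + 2 * cn) "."))
        ++ (List.replicate cn (List.replicate (space.length + 2 * cn) ".")
            ++ space.map (fun y => List.replicate cn "." ++ y ++ List.replicate (space.length + 2 * cn - cn - y.length) ".")
            ++ List.replicate cn (List.replicate (space.length + 2 * cn) "."))
          :: List.replicate cn (List.replicate (space.length + 2 * cn) (List.replicate (space.length + 2 * cn) ".")) := by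
  simp only [create_big_space]
  simp only [pv_map_pyRange_const]
  rw [pv_A_fold]
  rw [show ((1 : Int) + (cn : Int) * 2).toNat = 1 + 2 * cn from by omega,
    show (((space.length : Int)) + (cn : Int) * 2).toNat = space.length + 2 * cn from by omega]
  rw [List.getD_replicate _ (show cn < 1 + 2 * cn from by omega)]
  rw [show (1 + 2 * cn) = cn + (cn + 1) from by omega, List.replicate_add,
    List.replicate_succ]
  rw [pv_set_middle _ _ _ _ _ (by simp)]
  rw [pv_center space cn hlen]

-- B on nonnegative cycles = (cn : Nat): the same closed form
theorem pv_B_char (space : List (List String)) (cn : Nat)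
    (hlen : ∀ y ∈ space, y.length ≤ space.length + cn) :
    create_big_space_alt space (cn : Int)
      = List.replicate cn (List.replicate (space.length + 2 * cn) (List.replicate (space.length + 2 * cn) "."))
        ++ (List.replicate cn (List.replicate (space.length + 2 * cn) ".")
            ++ space.map (fun y => List.replicate cn "." ++ y ++ List.replicate (space.length + 2 * cn - cn - y.length) ".")
            ++ List.replicate cn (List.replicate (space.length + 2 * cn) "."))
          :: List.replicate cn (List.replicate (space.length + 2 * cn) (List.replicate (space.length + 2 * cn) ".")):= by
  simp only [create_big_space_alt]
  rw [pv_map_range_ite]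
  have hrow : ∀ y ∈ space,
      ((((space.length : Int)) + 2 * ((cn : Int))) - ((cn : Int)) - ((y.length : Int))).toNat
        = space.length + 2 * cn - cn - y.length := by
    intro y hy
    have := hlen y hy
    omega
  rw [List.map_congr_left (g := fun y => List.replicate ((cn : Int)).toNat "." ++ y
      ++ List.replicate (space.length + 2 * cn - cn - y.length) ".")
    (fun y hy => by rw [hrow y hy])]
  simp only [Int.toNat_natCast,
    show (((space.length : Int)) + 2 * ((cn : Int))).toNat = space.length + 2 * cn from by omega]

-- both programs return [] when cycles < 0 and every row is empty
theorem pv_A_neg (space : List (List String)) (cycles : Int) (hc : cycles < 0)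
    (he : ∀ y ∈ space, y = []) : create_big_space space cycles = [] := by
  simp only [create_big_space]
  rw [show PySem.List.pyRange 0 (1 + cycles * 2) = [] from PySem.List.pyRange_one_eq_nil (by omega), List.map_nil]
  rw [PySem.List.foldl_congr_mem _ _ (fun bs _ => bs) _ (by
    intro acc x hx
    rcases (PySem.List.mem_enumerate_iff _ _ _).mp hx with ⟨k, hk, rfl⟩
    have h0 : space[k] = [] := he _ (List.getElem_mem hk)
    simp [h0, PySem.List.enumerate_nil])]
  exact List.foldl_fixed _

theorem pv_B_neg (space : List (List String)) (cycles : Int) (hc : cycles < 0) :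
    create_big_space_alt space cycles = [] := by
  simp only [create_big_space_alt]
  rw [show PySem.List.pyRange 0 (1 + 2 * cycles) = [] from PySem.List.pyRange_one_eq_nil (by omega), List.map_nil]

theorem create_big_space_spec : Claim_equal_create_big_space := by
  intro space cycles _ hpre
  unfold Spec_create_big_space
  by_cases hc : 0 ≤ cycles
  · obtain ⟨cn, rfl⟩ : ∃ k : Nat, cycles = (k : Int) :=
      ⟨cycles.toNat, (Int.toNat_of_nonneg hc).symm⟩
    unfold Pre_create_big_space at hpre
    rw [if_pos hc] at hpre
    have hlen : ∀ y ∈ space, y.length ≤ space.length + cn := by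
      intro y hy; have := hpre y hy; exact_mod_cast this
    rw [pv_A_char space cn hlen, pv_B_char space cn hlen]
  · unfold Pre_create_big_space at hpre
    rw [if_neg hc] at hpre
    rw [pv_A_neg space cycles (by omega) hpre, pv_B_neg space cycles (by omega)]
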